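-- pv_equiv track=rewrite | github.com/paiml/depyler | examples/hard_pathological_dict2.py | running_frequency
-- ===== SOURCE A (Python) =====
-- def running_frequency(items: list[int]) -> list[int]:
--     """For each position, return how many times that value has appeared so far."""
--     freq: dict[int, int] = {}
--     result: list[int] = []
--     i: int = 0
--     while i < len(items):
--         val: int = items[i]
--         if val in freq:
--             freq[val] = freq[val] + 1
--         else:
--             freq[val] = 1
--         result.append(freq[val])
--         i = i + 1
--     return result
-- ===== SOURCE B (Python) =====
-- def running_frequency(items: list[int]) -> list[int]:
--     """For each position, return how many times that value has appeared so far."""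
--     return [items[:i + 1].count(v) for i, v in enumerate(items)]
-- ===== Notes on version B (the rewrite author's own statement) =====
-- stated objective: simpler
-- what changed: Replaces the incremental dict counter and explicit while-loop with a one-line prefix-scan comprehension: each position's running count is the count of that value in the prefix up to it.
import Mathlib
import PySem

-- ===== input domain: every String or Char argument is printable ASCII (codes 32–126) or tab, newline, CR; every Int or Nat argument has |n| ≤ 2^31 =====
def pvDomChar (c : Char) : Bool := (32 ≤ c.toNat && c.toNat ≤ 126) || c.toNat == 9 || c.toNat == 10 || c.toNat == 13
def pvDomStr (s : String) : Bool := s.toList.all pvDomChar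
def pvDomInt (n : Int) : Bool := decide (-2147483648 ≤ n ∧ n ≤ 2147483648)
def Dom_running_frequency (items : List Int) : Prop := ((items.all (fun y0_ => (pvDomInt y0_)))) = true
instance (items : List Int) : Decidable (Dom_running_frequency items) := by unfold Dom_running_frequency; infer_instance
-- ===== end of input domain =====

-- B replaces A's dict-counter loop by a prefix-scan comprehension (simpler, same values; not faster).

-- ===== PORT A =====
-- literal port: while-loop over indices becomes a fold over items carrying (freq dict, result);
-- freq[val] after the update is always present, so the read is getD (exact here).
def running_frequency (items : List Int) : List Int :=
  (items.foldl
    (fun (st : PySem.Dict Int Int × List Int) val =>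
      let freq :=
        if st.1.contains val then st.1.insert val (st.1.getD val 0 + 1)
        else st.1.insert val 1
      (freq, st.2 ++ [freq.getD val 0]))
    (PySem.Dict.empty, [])).2

-- ===== PORT B =====
def running_frequency_alt (items : List Int) : List Int :=
  (PySem.List.enumerate items 0).map
    (fun iv => ((PySem.List.slice items none (some (iv.1 + 1))).count iv.2 : Int))

-- ===== PRECONDITION & SPEC =====
def Spec_running_frequency (items : List Int) (out : List Int) : Prop := out = running_frequency_alt items
instance (items : List Int) (out : List Int) : Decidable (Spec_running_frequency items out) := by unfold Spec_running_frequency; infer_instance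

-- ===== CLAIM (what is proved, stated in full; the proofs are below) =====
def Claim_equal_running_frequency : Prop := ∀ (items : List Int), Dom_running_frequency items → Spec_running_frequency items (running_frequency items)

-- ===== LEMMAS AND PROOFS =====

-- A's branch is the uniform counting insert: when val is absent, getD val 0 = 0.
theorem pv_step_eq (d : PySem.Dict Int Int) (val : Int) :
    (if d.contains val then d.insert val (d.getD val 0 + 1) else d.insert val 1)
      = d.insert val (d.getD val 0 + 1) := by
  by_cases h : d.contains val = true
  · simp [h]
  · simp [h, PySem.Dict.getD_of_not_contains d 0 (by simpa using h)]

theorem pv_main : ∀ (l p r : List Int),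
    (l.foldl
      (fun (st : PySem.Dict Int Int × List Int) val =>
        (st.1.insert val (st.1.getD val 0 + 1), st.2 ++ [st.1.getD val 0 + 1]))
      (p.foldl (fun d x => d.insert x (d.getD x 0 + 1)) PySem.Dict.empty, r)).2
    = r ++ (PySem.List.enumerate l (p.length : Int)).map
        (fun iv => ((PySem.List.slice (p ++ l) none (some (iv.1 + 1))).count iv.2 : Int)) := by
  intro l
  induction l with
  | nil => intro p r; simp [PySem.List.enumerate_nil]
  | cons v t ih =>
    intro p r
    have hd : (p.foldl (fun d x => d.insert x (d.getD x 0 + 1)) PySem.Dict.empty).getD v 0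
        = (p.count v : Int) := by
      rw [PySem.Dict.getD_foldl_insert_add_one]
      simp [PySem.Dict.getD_empty]
    have hfold : (p.foldl (fun d x => d.insert x (d.getD x 0 + 1)) PySem.Dict.empty).insert v
          ((p.count v : Int) + 1)
        = (p ++ [v]).foldl (fun d x => d.insert x (d.getD x 0 + 1)) PySem.Dict.empty := by
      rw [List.foldl_append, List.foldl_cons, List.foldl_nil, hd]
    simp only [List.foldl_cons]
    simp only [hd, hfold]
    rw [ih (p ++ [v]) (r ++ [(p.count v : Int) + 1])]
    rw [PySem.List.enumerate_cons]
    simp only [List.map_cons]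
    have hsl : PySem.List.slice (p ++ v :: t) none (some ((p.length : Int) + 1))
        = p ++ [v] := by
      have h1 : ((p.length : Int) + 1) = ((p.length + 1 : Nat) : Int) := by push_cast; ring
      rw [h1, PySem.List.slice_to_natCast]
      have h2 : p ++ v :: t = (p ++ [v]) ++ t := by simp
      rw [h2]
      rw [List.take_append]
      simp
    have hpc : (((p ++ [v]).count v : Nat) : Int) = (p.count v : Int) + 1 := by
      simp [List.count_append]
    have hrest : p ++ v :: t = (p ++ [v]) ++ t := by simp
    rw [hsl, hpc, hrest]
    have h4 : (p.length : Int) + 1 = (((p ++ [v]).length : Nat) : Int) := by simp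
    rw [h4]
    simp

-- ===== VERDICT (by name: the statement is the Claim_ definition above) =====
theorem running_frequency_spec : Claim_equal_running_frequency := by
  intro items _
  show running_frequency items = running_frequency_alt items
  unfold running_frequency running_frequency_alt
  have hstep : (fun (st : PySem.Dict Int Int × List Int) val =>
      let freq :=
        if st.1.contains val then st.1.insert val (st.1.getD val 0 + 1)
        else st.1.insert val 1
      (freq, st.2 ++ [freq.getD val 0]))
    = (fun (st : PySem.Dict Int Int × List Int) val =>
        (st.1.insert val (st.1.getD val 0 + 1), st.2 ++ [st.1.getD val 0 + 1])) := by
    funext st val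
    simp only [pv_step_eq, PySem.Dict.getD_insert_self]
  rw [hstep]
  have := pv_main items [] []
  simpa using this
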